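-- pv_equiv track=rewrite | github.com/Shaikh002/personal_work | auto_reels_to_youtube.py | ensure_exact_hashtags
-- ===== SOURCE A (Python) =====
-- HACKING_TAGS = ["#ethicalhacking", "#cybersecurity", "#bugbounty", "#infosec", "#penetrationtesting", "#redteam", "#vulnerability", "#securityresearch", "#threatintel", "#whitehat", "#hackerlife", "#securitytips", "#hackingtools"]
--
-- TRENDING_TAGS = ["#viral", "#trending", "#Shorts", "#foryou", "#explore", "#tech", "#contentcreator", "#daily", "#automation", "#viralshorts"]
--
-- CACHED_TRENDS = [
--     "AI tools", "Cybersecurity", "Ethical hacking", "Bug bounty",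
--     "Linux commands", "Automation tools", "Python", "Nmap", "Kali Linux", "Malware analysis"
-- ]
--
-- def ensure_exact_hashtags(tags, desired=8):
--     """Deduplicate, then pad with stable niche tags to reach exactly N."""
--     base_pool = list(dict.fromkeys(tags))
--     if len(base_pool) >= desired:
--         return base_pool[:desired]
--     # deterministic padding so tags are stable
--     padding_source = list(dict.fromkeys(
--         HACKING_TAGS + TRENDING_TAGS + [f"#{t.replace(' ', '')}" for t in CACHED_TRENDS]
--     ))
--     for t in padding_source:
--         if t not in base_pool:
--             base_pool.append(t)
--         if len(base_pool) == desired: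
--             break
--     return base_pool[:desired]
-- ===== SOURCE B (Python) =====
-- HACKING_TAGS = ["#ethicalhacking", "#cybersecurity", "#bugbounty", "#infosec", "#penetrationtesting", "#redteam", "#vulnerability", "#securityresearch", "#threatintel", "#whitehat", "#hackerlife", "#securitytips", "#hackingtools"]
--
-- TRENDING_TAGS = ["#viral", "#trending", "#Shorts", "#foryou", "#explore", "#tech", "#contentcreator", "#daily", "#automation", "#viralshorts"]
--
-- CACHED_TRENDS = [
--     "AI tools", "Cybersecurity", "Ethical hacking", "Bug bounty",
--     "Linux commands", "Automation tools", "Python", "Nmap", "Kali Linux", "Malware analysis"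
-- ]
--
-- # padding pool built once at module load, not on every call
-- PADDING_POOL = list(dict.fromkeys(
--     HACKING_TAGS + TRENDING_TAGS + ["#" + t.replace(" ", "") for t in CACHED_TRENDS]
-- ))
--
-- def ensure_exact_hashtags(tags, desired=8):
--     """Deduplicate, then pad with stable niche tags to reach exactly N."""
--     base = list(dict.fromkeys(tags))
--     if len(base) < desired:
--         base = list(dict.fromkeys(base + PADDING_POOL))
--     return base[:desired]
-- ===== Notes on version B (the rewrite author's own statement) =====
-- stated objective: simpler
-- what changed: The membership-test loop with break over the padding source is replaced by one order-preserving dedup of base+padding followed by a single slice to desired, with the padding pool deduped once at module load instead of per call.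
import Mathlib
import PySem

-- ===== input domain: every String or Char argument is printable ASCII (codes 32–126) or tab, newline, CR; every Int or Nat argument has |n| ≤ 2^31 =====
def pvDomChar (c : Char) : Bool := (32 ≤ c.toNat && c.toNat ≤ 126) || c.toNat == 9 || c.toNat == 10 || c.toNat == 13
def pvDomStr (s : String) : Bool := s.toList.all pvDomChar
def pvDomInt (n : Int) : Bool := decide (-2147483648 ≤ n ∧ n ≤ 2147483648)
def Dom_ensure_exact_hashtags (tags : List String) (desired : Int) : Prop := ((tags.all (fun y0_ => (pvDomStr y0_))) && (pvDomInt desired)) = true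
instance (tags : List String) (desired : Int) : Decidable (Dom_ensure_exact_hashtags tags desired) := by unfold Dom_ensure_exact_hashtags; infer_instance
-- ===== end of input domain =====

-- B replaces A's membership-test/break padding loop by one dedup of base+padding plus a slice (simpler decomposition, same cost).

-- module constants (shared data of both Python files)
def HACKING_TAGS : List String := ["#ethicalhacking", "#cybersecurity", "#bugbounty", "#infosec", "#penetrationtesting", "#redteam", "#vulnerability", "#securityresearch", "#threatintel", "#whitehat", "#hackerlife", "#securitytips", "#hackingtools"]
def TRENDING_TAGS : List String := ["#viral", "#trending", "#Shorts", "#foryou", "#explore", "#tech", "#contentcreator", "#daily", "#automation", "#viralshorts"]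
def CACHED_TRENDS : List String := ["AI tools", "Cybersecurity", "Ethical hacking", "Bug bounty", "Linux commands", "Automation tools", "Python", "Nmap", "Kali Linux", "Malware analysis"]

-- ===== PORT A =====
-- A's padding loop: append t if absent, break as soon as len(base_pool) == desired
def loopA_ensure (desired : Int) : List String → List String → List String
  | base, [] => base
  | base, t :: rest =>
    let base' := if base.contains t then base else base ++ [t]
    if (base'.length : Int) = desired then base' else loopA_ensure desired base' rest

def ensure_exact_hashtags (tags : List String) (desired : Int) : List String :=
  let base_pool := PySem.List.dedup tags
  if desired ≤ (base_pool.length : Int) then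
    PySem.List.slice base_pool none (some desired)
  else
    let padding_source := PySem.List.dedup
      (HACKING_TAGS ++ TRENDING_TAGS ++ CACHED_TRENDS.map (fun t => "#" ++ PySem.Str.replace t " " ""))
    PySem.List.slice (loopA_ensure desired base_pool padding_source) none (some desired)

-- ===== PORT B =====
-- B's module-level PADDING_POOL
def PADDING_POOL : List String := PySem.List.dedup
  (HACKING_TAGS ++ TRENDING_TAGS ++ CACHED_TRENDS.map (fun t => "#" ++ PySem.Str.replace t " " ""))

def ensure_exact_hashtags_alt (tags : List String) (desired : Int) : List String :=
  let base := PySem.List.dedup tags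
  let base := if (base.length : Int) < desired then PySem.List.dedup (base ++ PADDING_POOL) else base
  PySem.List.slice base none (some desired)

-- ===== PRECONDITION & SPEC =====
def Spec_ensure_exact_hashtags (tags : List String) (desired : Int) (out : List String) : Prop := out = ensure_exact_hashtags_alt tags desired
instance (tags : List String) (desired : Int) (out : List String) : Decidable (Spec_ensure_exact_hashtags tags desired out) := by unfold Spec_ensure_exact_hashtags; infer_instance

-- ===== CLAIM (what is proved, stated in full; the proofs are below) =====
def Claim_equal_ensure_exact_hashtags : Prop := ∀ (tags : List String) (desired : Int), Dom_ensure_exact_hashtags tags desired → Spec_ensure_exact_hashtags tags desired (ensure_exact_hashtags tags desired)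

-- ===== LEMMAS AND PROOFS =====

-- folding Set.add only appends: the accumulator is a prefix of the result
lemma prefix_foldl_add (P : List String) : ∀ (s : List String), s <+: List.foldl PySem.Set.add s P := by
  induction P with
  | nil => intro s; exact List.prefix_rfl
  | cons t rest ih =>
    intro s
    refine List.IsPrefix.trans ?_ (ih (PySem.Set.add s t))
    unfold PySem.Set.add
    split
    · exact List.prefix_rfl
    · exact ⟨[t], rfl⟩

-- A's break-at-desired loop agrees with the full fold up to the first `desired` elements
lemma loopA_take (d : Int) : ∀ (P base : List String), (base.length : Int) < d →
    (loopA_ensure d base P).take d.toNat = (List.foldl PySem.Set.add base P).take d.toNat := by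
  intro P
  induction P with
  | nil => intro base _; rfl
  | cons t rest ih =>
    intro base hlt
    have hadd : PySem.Set.add base t = if base.contains t then base else base ++ [t] := rfl
    simp only [loopA_ensure, List.foldl_cons, ← hadd]
    by_cases hd : ((PySem.Set.add base t).length : Int) = d
    · simp only [hd, if_true]
      obtain ⟨sfx, hs⟩ := prefix_foldl_add rest (PySem.Set.add base t)
      rw [← hs, List.take_append_of_le_length]
      omega
    · rw [if_neg hd]
      apply ih
      have hle : (PySem.Set.add base t).length ≤ base.length + 1 := by
        rw [hadd]; split <;> simp
      omega

-- dedup of nodup-prefix ++ P is the fold of Set.add over P starting from the prefix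
lemma dedup_append_eq_foldl (base P : List String) (h : PySem.List.dedup base = base) :
    PySem.List.dedup (base ++ P) = List.foldl PySem.Set.add base P := by
  rw [PySem.List.dedup_eq_ofList, PySem.Set.ofList_eq_foldl, List.foldl_append,
      ← PySem.Set.ofList_eq_foldl, ← PySem.List.dedup_eq_ofList, h]

lemma dedup_idem (xs : List String) : PySem.List.dedup (PySem.List.dedup xs) = PySem.List.dedup xs := by
  have h := PySem.List.nodup_dedup (α := String) xs
  rw [PySem.List.dedup_eq_ofList (PySem.List.dedup xs)]
  exact PySem.Set.ofList_eq_self_of_nodup _ h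

-- ===== VERDICT (by name: the statement is the Claim_ definition above) =====
theorem ensure_exact_hashtags_spec : Claim_equal_ensure_exact_hashtags := by
  intro tags desired _
  unfold Spec_ensure_exact_hashtags ensure_exact_hashtags ensure_exact_hashtags_alt
  simp only []
  by_cases h : desired ≤ ((PySem.List.dedup tags).length : Int)
  · rw [if_pos h, if_neg (by omega)]
  · rw [if_neg h, if_pos (by omega)]
    have hd : (0:Int) ≤ desired := by
      have : (0:Int) ≤ ((PySem.List.dedup tags).length : Int) := by positivity
      omega
    rw [PySem.List.slice_to _ hd, PySem.List.slice_to _ hd,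
        dedup_append_eq_foldl _ _ (dedup_idem tags),
        PADDING_POOL, loopA_take desired _ _ (by omega)]
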